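-- pv_equiv track=rewrite | github.com/DaniilIljin/Python_basics | KT/kt1/exam.py | list_move
-- ===== SOURCE A (Python) =====
-- def list_move(initial_list: list, amount: int, factor: int) -> list:
--     """
--     Create amount lists where elements are shifted right by factor.
--
--     This function creates a list with amount of lists inside it.
--     In each sublist, elements are shifted right by factor elements.
--     factor >= 0
--
--     list_move(["a", "b", "c"], 3, 0) => [['a', 'b', 'c'], ['a', 'b', 'c'], ['a', 'b', 'c']]
--     list_move(["a", "b", "c"], 3, 1) => [['a', 'b', 'c'], ['c', 'a', 'b'], ['b', 'c', 'a']]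
--     list_move([1, 2, 3], 3, 2) => [[1, 2, 3], [2, 3, 1], [3, 1, 2]]
--     list_move([1, 2, 3], 4, 1) => [[1, 2, 3], [3, 1, 2], [2, 3, 1], [1, 2, 3]]
--     list_move([], 3, 4) => [[], [], [], []]
--     """
--     if not initial_list:
--         list_of_lists = []
--         for i in range(amount):
--             list_of_lists.append([])
--         return list_of_lists
--     else:
--         final_list = [initial_list]
--         for i in range(amount - 1):
--             final_list.append([])
--         counter = 0
--         for rep in range(len(final_list) - 1):
--             one_of_lists = []
--             dict_with_indexes = {}
--             one_of_lists.extend(final_list[counter])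
--             for index, element in enumerate(one_of_lists):
--                 if index + 1 + factor <= len(one_of_lists):
--                     dict_with_indexes[index + factor] = element
--                 elif index + 1 + factor > len(one_of_lists):
--                     needed_to_be_skipped = (index + 1 + factor) // len(one_of_lists)
--                     new_index = index + factor - len(one_of_lists) * needed_to_be_skipped
--                     dict_with_indexes[new_index] = element
--             counter += 1
--             for element1 in sorted(dict_with_indexes):
--                 final_list[counter].append(dict_with_indexes[element1])
--     return final_list
-- ===== SOURCE B (Python) =====
-- def list_move(initial_list: list, amount: int, factor: int) -> list:
--     """Row 0 is the list itself; each further row k (up to amount-1) is the list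
--     rotated right by k*factor, computed as one modular split-and-concatenate slice."""
--     if not initial_list:
--         return [[] for _ in range(amount)]
--     n = len(initial_list)
--     rows = [list(initial_list)]
--     for k in range(1, amount):
--         j = (-k * factor) % n
--         rows.append(initial_list[j:] + initial_list[:j])
--     return rows
-- ===== Notes on version B (the rewrite author's own statement) =====
-- stated objective: faster
-- what changed: Each row is computed directly as a modular split-and-concatenate slice (right rotation by k*factor mod n) instead of rebuilding every row from the previous one through an index dict plus a sort of its keys; Pre_ keeps the docstring's stated domain factor >= 0 (for negative factor A's key ordering happens to yield unshifted copies, an undocumented corner where either value is defensible).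
-- intended difference: For non-constant lists with amount >= 2 and factor >= len(initial_list), A's floor-division wraparound is off by one (the key for the last slot becomes -1), so each of A's rotation steps shifts right by (factor % n) + 1 instead of the documented factor positions; B rotates by factor % n, the intended amount. — e.g. on list_move([1, 2, 3], 2, 3): A returns [[1, 2, 3], [3, 1, 2]], B returns [[1, 2, 3], [1, 2, 3]]
-- outside the precondition, e.g. on list_move([1, 2, 3], 2, -1): A returns [[1, 2, 3], [1, 2, 3]], B returns [[1, 2, 3], [2, 3, 1]]
import Mathlib
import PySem

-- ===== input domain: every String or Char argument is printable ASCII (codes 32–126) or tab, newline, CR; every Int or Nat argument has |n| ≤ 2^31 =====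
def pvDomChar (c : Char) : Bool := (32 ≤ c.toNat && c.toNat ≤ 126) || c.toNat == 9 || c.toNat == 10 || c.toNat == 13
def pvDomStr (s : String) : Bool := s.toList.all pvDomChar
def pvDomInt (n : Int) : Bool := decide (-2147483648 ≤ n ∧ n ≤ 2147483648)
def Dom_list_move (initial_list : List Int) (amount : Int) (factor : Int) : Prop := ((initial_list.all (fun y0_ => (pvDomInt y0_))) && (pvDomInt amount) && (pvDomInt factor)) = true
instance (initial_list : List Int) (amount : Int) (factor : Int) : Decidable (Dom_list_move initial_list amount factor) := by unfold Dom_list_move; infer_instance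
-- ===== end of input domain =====

-- B computes each of the amount rows by one modular split-and-concatenate slice instead of
-- A's per-row dict-of-new-indexes plus key sort; return-value equivalence only (A's first
-- row aliases its argument, which value comparison cannot see).

-- ===== PORT A =====
-- the dict-building loop of A (helper named for the proofs; body is A's loop verbatim)
def pvDictA (one : List Int) (factor : Int) : PySem.Dict Int Int :=
  (PySem.List.enumerate one).foldl
    (fun d p =>
      if p.1 + 1 + factor ≤ (one.length : Int) then d.insert (p.1 + factor) p.2
      else if p.1 + 1 + factor > (one.length : Int) then
        let needed_to_be_skipped := PySem.Int.floordiv (p.1 + 1 + factor) (one.length : Int)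
        let new_index := p.1 + factor - (one.length : Int) * needed_to_be_skipped
        d.insert new_index p.2
      else d)
    PySem.Dict.empty

-- one iteration of A's 'for rep in range(...)' loop; state = (final_list, counter).
-- final_list[counter] is read with List.getD (exact here: counter is always a
-- nonnegative in-range index), and the append loop sets final_list[counter+1].
def pvBodyA (factor : Int) (st : List (List Int) × Nat) : List (List Int) × Nat :=
  let one : List Int := [] ++ st.1.getD st.2 []
  let d := pvDictA one factor
  let counter' := st.2 + 1
  ((PySem.List.sorted d.keys (fun k => k) false).foldl
      (fun fl2 k => fl2.set counter' (fl2.getD counter' [] ++ [d.getD k 0])) st.1,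
   counter')

def list_move (initial_list : List Int) (amount : Int) (factor : Int) : List (List Int) :=
  if initial_list = [] then
    (PySem.List.pyRange 0 amount 1).foldl (fun acc _ => acc ++ [([] : List Int)]) []
  else
    let final0 := (PySem.List.pyRange 0 (amount - 1) 1).foldl
      (fun acc _ => acc ++ [([] : List Int)]) [initial_list]
    ((PySem.List.pyRange 0 ((final0.length : Int) - 1) 1).foldl
        (fun st _ => pvBodyA factor st) (final0, 0)).1

-- ===== PORT B =====
def list_move_alt (initial_list : List Int) (amount : Int) (factor : Int) : List (List Int) :=
  if initial_list = [] then
    (PySem.List.pyRange 0 amount 1).map (fun _ => ([] : List Int))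
  else
    let n : Int := initial_list.length
    (PySem.List.pyRange 1 amount 1).foldl
      (fun rows k =>
        let j := PySem.Int.mod (-k * factor) n
        rows ++ [PySem.List.slice initial_list (some j) none
                  ++ PySem.List.slice initial_list none (some j)])
      [initial_list]

-- ===== PRECONDITION & SPEC =====
-- Pre_ keeps the function's documented domain (the docstring states factor >= 0);
-- for negative factor A's key ordering happens to yield unshifted copies while B
-- rotates by factor mod n — an undocumented corner where either value is defensible.
def Pre_list_move (initial_list : List Int) (amount : Int) (factor : Int) : Prop :=
  0 ≤ factor
instance (initial_list : List Int) (amount : Int) (factor : Int) :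
    Decidable (Pre_list_move initial_list amount factor) := by
  unfold Pre_list_move; infer_instance

def pvWitness_list_move : List Int × Int × Int := ([1, 2, 3], 3, 1)

-- On non-constant lists with amount >= 2 and factor >= len(initial_list), A's
-- floor-division wraparound is off by one (the key for the last slot becomes -1), so each
-- of A's rotation steps shifts right by (factor % n) + 1 instead of the documented factor
-- positions; B rotates by factor % n per step, the intended amount.
def D_list_move (initial_list : List Int) (amount : Int) (factor : Int) : Prop :=
  (∃ x ∈ initial_list, x ≠ initial_list.headI) ∧ 2 ≤ amount ∧
    (initial_list.length : Int) ≤ factor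
instance (initial_list : List Int) (amount : Int) (factor : Int) :
    Decidable (D_list_move initial_list amount factor) := by
  unfold D_list_move; infer_instance

def Spec_list_move (initial_list : List Int) (amount : Int) (factor : Int)
    (out : List (List Int)) : Prop :=
  ¬ D_list_move initial_list amount factor → out = list_move_alt initial_list amount factor
instance (initial_list : List Int) (amount : Int) (factor : Int) (out : List (List Int)) :
    Decidable (Spec_list_move initial_list amount factor out) := by
  unfold Spec_list_move; infer_instance

def pvDiffWitness_list_move : List Int × Int × Int := ([1, 2, 3], 2, 3)
def pvDiffWitnessOut_list_move : (List (List Int)) × (List (List Int)) :=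
  ([[1, 2, 3], [3, 1, 2]], [[1, 2, 3], [1, 2, 3]])

-- ===== CLAIM (what is proved, stated in full; the proofs are below) =====
def Claim_unchanged_list_move : Prop := ∀ (initial_list : List Int) (amount : Int) (factor : Int), Dom_list_move initial_list amount factor → Pre_list_move initial_list amount factor → Spec_list_move initial_list amount factor (list_move initial_list amount factor)
def Claim_changed_list_move : Prop := Dom_list_move (pvDiffWitness_list_move.1) (pvDiffWitness_list_move.2.1) (pvDiffWitness_list_move.2.2) ∧ Pre_list_move (pvDiffWitness_list_move.1) (pvDiffWitness_list_move.2.1) (pvDiffWitness_list_move.2.2) ∧ D_list_move (pvDiffWitness_list_move.1) (pvDiffWitness_list_move.2.1) (pvDiffWitness_list_move.2.2) ∧ list_move (pvDiffWitness_list_move.1) (pvDiffWitness_list_move.2.1) (pvDiffWitness_list_move.2.2) = pvDiffWitnessOut_list_move.1 ∧ list_move_alt (pvDiffWitness_list_move.1) (pvDiffWitness_list_move.2.1) (pvDiffWitness_list_move.2.2) = pvDiffWitnessOut_list_move.2 ∧ pvDiffWitnessOut_list_move.1 ≠ pvDiffWitnessOut_list_move.2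
def Claim_exact_list_move : Prop := ∀ (initial_list : List Int) (amount : Int) (factor : Int), Dom_list_move initial_list amount factor → Pre_list_move initial_list amount factor → D_list_move initial_list amount factor → list_move initial_list amount factor ≠ list_move_alt initial_list amount factor

-- ===== LEMMAS AND PROOFS =====

-- the per-step new-index function, as a function of the Nat position
def pvKey (c s n i : Nat) : Int := if i < s then (i : Int) + c else (i : Int) + c - n

-- A's per-step shift: amount of LEFT rotation each step performs
def pvS (n : Nat) (f : Int) : Nat :=
  if f < (n : Int) then n - f.toNat else n - 1 - (PySem.Int.mod f n).toNat

-- set at the junction of an append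
theorem pv_set_append_cons {α : Type} (xs zs : List α) (y w : α) (k : Nat)
    (hk : k = xs.length) : (xs ++ y :: zs).set k w = (xs ++ [w]) ++ zs := by
  subst hk
  induction xs with
  | nil => rfl
  | cons a t ih => simp [List.set, ih]

-- the append loop 'for k in ks: fl[c].append(g(k))' sets slot c once
theorem pv_setfold {α κ : Type} (ks : List κ) (g : κ → α) (fl : List (List α)) (c : Nat)
    (hc : c < fl.length) :
    ks.foldl (fun fl2 k => fl2.set c (fl2.getD c [] ++ [g k])) fl
      = fl.set c (fl.getD c [] ++ ks.map g) := by
  induction ks generalizing fl with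
  | nil =>
    rw [List.foldl_nil, List.map_nil, List.append_nil,
      List.getD_eq_getElem _ _ hc, List.set_getElem_self]
  | cons k t ih =>
    rw [List.foldl_cons, ih _ (by simpa using hc)]
    have hg : (fl.set c (fl.getD c [] ++ [g k])).getD c [] = fl.getD c [] ++ [g k] := by
      rw [List.getD_eq_getElem?_getD, List.getElem?_set_self hc]; rfl
    rw [hg, List.set_set, List.map_cons]
    simp

theorem pv_map_range_getD {α : Type} (L : List α) (a m : Nat) (d : α) (h : a + m ≤ L.length) :
    (List.range m).map (fun j => L.getD (a + j) d) = (L.drop a).take m := by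
  apply List.ext_getElem
  · simp; omega
  · intro i h1 h2
    have h1' : i < m := by simpa using h1
    simp only [List.getElem_map, List.getElem_range, List.getElem_take, List.getElem_drop]
    rw [List.getD_eq_getElem _ _ (by omega)]

-- dict built by A's enumerate loop, as an explicit items list
theorem pv_dictA_eq (one : List Int) (f : Int) (hne : one ≠ []) (hf : 0 ≤ f) (c s : Nat)
    (hcs : if f < (one.length : Int) then ((c : Int) = f ∧ c + s = one.length)
           else ((c : Int) = PySem.Int.mod f one.length ∧ c + s + 1 = one.length)) :
    pvDictA one f
      = PySem.Dict.mk ((List.range one.length).map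
          (fun i => (pvKey c s one.length i, one.getD i 0))) := by
  set n := one.length with hn
  have hn0 : 0 < n := List.length_pos_of_ne_nil hne
  have hn0' : (0 : Int) < n := by exact_mod_cast hn0
  unfold pvDictA
  rw [PySem.List.enumerate_eq_map_pyRange one 0]
  have hlen : PySem.List.len one = (n : Int) := by
    simp [PySem.List.len_eq]
    omega
  rw [hlen, PySem.List.pyRange_zero_nat n, List.map_map, List.foldl_map]
  rw [PySem.List.foldl_congr_mem _ _
    (fun (d : PySem.Dict Int Int) (i : Nat) => d.insert (pvKey c s n i) (one.getD i 0)) _ ?_]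
  · apply PySem.Dict.ext
    rw [PySem.Dict.items_foldl_insert_fresh (List.range n) (fun i => pvKey c s n i)
      (fun i => one.getD i 0) PySem.Dict.empty
      (fun a _ => PySem.Dict.contains_empty _) ?_]
    · simp [PySem.Dict.empty]
    · refine List.Nodup.map_on ?_ List.nodup_range
      intro i hi j hj h
      have hi' := List.mem_range.1 hi
      have hj' := List.mem_range.1 hj
      simp only [pvKey] at h
      split_ifs at h <;> omega
  · intro acc i hi
    have him := List.mem_range.1 hi
    simp only [Function.comp_apply, PySem.List.pyGetD_natCast]
    by_cases hreg : f < (n : Int)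
    · rw [if_pos hreg] at hcs
      obtain ⟨hcc, hcs⟩ := hcs
      by_cases h1 : (i : Int) + 1 + f ≤ (n : Int)
      · rw [if_pos h1]
        have hks : pvKey c s n i = (i : Int) + f := by
          simp only [pvKey]
          rw [if_pos (by omega)]
          omega
        rw [hks]
      · rw [if_neg h1, if_pos (by omega)]
        have hfd : PySem.Int.floordiv ((i : Int) + 1 + f) (n : Int) = 1 :=
          (PySem.Int.floordiv_eq_iff_of_pos hn0').2 ⟨by omega, by omega⟩
        rw [hfd]
        have hks : pvKey c s n i = (i : Int) + f - (n : Int) * 1 := by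
          simp only [pvKey]
          rw [if_neg (by omega)]
          omega
        rw [hks]
    · rw [if_neg hreg] at hcs
      obtain ⟨hcc, hcs⟩ := hcs
      have hq := PySem.Int.floordiv_mul_add_mod f (n : Int)
      set q : Int := PySem.Int.floordiv f (n : Int) with hqd
      set r : Int := PySem.Int.mod f (n : Int) with hrd
      have hr0 : 0 ≤ r := PySem.Int.mod_nonneg f hn0'
      have hrn : r < n := PySem.Int.mod_lt f hn0'
      set t : Int := q * (n : Int) with htd
      have ht1 : (q + 1) * (n : Int) = t + n := by rw [htd]; ring
      have ht2 : (q + 1 + 1) * (n : Int) = t + n + n := by rw [htd]; ring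
      rw [if_neg (by omega), if_pos (by omega)]
      by_cases h2 : i < s
      · have hfd : PySem.Int.floordiv ((i : Int) + 1 + f) (n : Int) = q :=
          (PySem.Int.floordiv_eq_iff_of_pos hn0').2 ⟨by omega, by rw [ht1]; omega⟩
        rw [hfd]
        have hks : pvKey c s n i = (i : Int) + f - (n : Int) * q := by
          simp only [pvKey, if_pos h2]
          have hnq : (n : Int) * q = t := by rw [htd]; ring
          omega
        rw [hks]
      · have hfd : PySem.Int.floordiv ((i : Int) + 1 + f) (n : Int) = q + 1 :=
          (PySem.Int.floordiv_eq_iff_of_pos hn0').2 ⟨by rw [ht1]; omega, by rw [ht2]; omega⟩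
        rw [hfd]
        have hks : pvKey c s n i = (i : Int) + f - (n : Int) * (q + 1) := by
          simp only [pvKey, if_neg h2]
          have hnq : (n : Int) * (q + 1) = t + n := by rw [htd]; ring
          omega
        rw [hks]

-- sorted-keys readout of such a dict is a left rotation by s
theorem pv_gen (one : List Int) (c s : Nat) (hs : s ≤ one.length) (hcs : c + s ≤ one.length) :
    (PySem.List.sorted (PySem.Dict.mk ((List.range one.length).map
        (fun i => (pvKey c s one.length i, one.getD i 0)))).keys (fun k => k) false).map
      (fun k => (PySem.Dict.mk ((List.range one.length).map
        (fun i => (pvKey c s one.length i, one.getD i 0)))).getD k 0)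
      = one.drop s ++ one.take s := by
  set n := one.length with hn
  set P := (List.range n).map (fun i => (pvKey c s n i, one.getD i 0)) with hP
  have hkeys : (PySem.Dict.mk P).keys = (List.range n).map (fun i => pvKey c s n i) := by
    simp [PySem.Dict.keys, hP, List.map_map]
  have hinj : ∀ i < n, ∀ j < n, pvKey c s n i = pvKey c s n j → i = j := by
    intro i hi j hj h
    unfold pvKey at h
    split_ifs at h <;> omega
  have hnodup : ((List.range n).map (fun i => pvKey c s n i)).Nodup := by
    refine List.Nodup.map_on ?_ List.nodup_range
    intro i hi j hj h
    exact hinj i (List.mem_range.1 hi) j (List.mem_range.1 hj) h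
  have hkeysnd : (PySem.Dict.mk P).keys.Nodup := by rw [hkeys]; exact hnodup
  have hgetD : ∀ i, i < n → (PySem.Dict.mk P).getD (pvKey c s n i) 0 = one.getD i 0 := by
    intro i hi
    have hmem : (pvKey c s n i, one.getD i 0) ∈ (PySem.Dict.mk P).items := by
      show _ ∈ P
      exact List.mem_map.2 ⟨i, List.mem_range.2 hi, rfl⟩
    exact PySem.Dict.getD_of_mem_items _ hmem hkeysnd 0
  have hkeys2 : (PySem.Dict.mk P).keys
      = PySem.List.pyRange c ((c : Int) + s) 1 ++ PySem.List.pyRange ((c : Int) + s - n) c 1 := by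
    rw [hkeys, PySem.List.pyRange_one, PySem.List.pyRange_one]
    rw [show ((c : Int) + s - c).toNat = s by omega]
    rw [show ((c : Int) - ((c : Int) + s - n)).toNat = n - s by omega]
    have hsplit : List.range n = List.range s ++ (List.range (n - s)).map (fun j => s + j) := by
      conv_lhs => rw [show n = s + (n - s) by omega]
      exact List.range_add
    rw [hsplit, List.map_append, List.map_map]
    congr 1
    · refine List.map_congr_left ?_
      intro i hi
      have hi' := List.mem_range.1 hi
      simp only [pvKey, if_pos hi']
      omega
    · refine List.map_congr_left ?_
      intro j hj
      have hj' := List.mem_range.1 hj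
      simp only [Function.comp_apply, pvKey]
      rw [if_neg (by omega)]
      push_cast
      omega
  have hpw : (PySem.List.pyRange ((c : Int) + s - n) ((c : Int) + s) 1).Pairwise
      (fun a b => (fun (k : Int) => k) a < (fun (k : Int) => k) b) := by
    simpa using PySem.List.pairwise_lt_pyRange_one ((c : Int) + s - n) ((c : Int) + s)
  have hperm : (PySem.List.pyRange ((c : Int) + s - n) ((c : Int) + s) 1).Perm
      (PySem.Dict.mk P).keys := by
    rw [hkeys2, PySem.List.pyRange_one_append ((c : Int) + s - n) c ((c : Int) + s)
      (by omega) (by omega)]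
    exact List.perm_append_comm
  have hsorted : PySem.List.sorted (PySem.Dict.mk P).keys (fun k => k) false
      = PySem.List.pyRange ((c : Int) + s - n) ((c : Int) + s) 1 :=
    PySem.List.sorted_eq_of_perm_of_pairwise_lt _ _ _ hperm hpw
  rw [hsorted, PySem.List.pyRange_one_append ((c : Int) + s - n) c ((c : Int) + s)
    (by omega) (by omega), List.map_append]
  congr 1
  · rw [PySem.List.pyRange_one]
    rw [show ((c : Int) - ((c : Int) + s - n)).toNat = n - s by omega]
    rw [List.map_map]
    have heq : ∀ j ∈ List.range (n - s),
        ((fun k => (PySem.Dict.mk P).getD k 0) ∘ fun k : Nat => (c : Int) + s - n + k) j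
          = one.getD (s + j) 0 := by
      intro j hj
      have hj' := List.mem_range.1 hj
      have hk : pvKey c s n (s + j) = (c : Int) + s - n + j := by
        simp only [pvKey]
        rw [if_neg (by omega)]
        push_cast
        omega
      simp only [Function.comp_apply, ← hk]
      exact hgetD (s + j) (by omega)
    rw [List.map_congr_left heq, pv_map_range_getD one s (n - s) 0 (by omega)]
    exact List.take_of_length_le (by simp; omega)
  · rw [PySem.List.pyRange_one]
    rw [show ((c : Int) + s - c).toNat = s by omega]
    rw [List.map_map]
    have heq : ∀ j ∈ List.range s,
        ((fun k => (PySem.Dict.mk P).getD k 0) ∘ fun k : Nat => (c : Int) + k) j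
          = one.getD (0 + j) 0 := by
      intro j hj
      have hj' := List.mem_range.1 hj
      have hk : pvKey c s n j = (c : Int) + j := by
        simp only [pvKey, if_pos hj']
        omega
      simp only [Function.comp_apply, ← hk, Nat.zero_add]
      exact hgetD j (by omega)
    rw [List.map_congr_left heq, pv_map_range_getD one 0 s 0 (by omega), List.drop_zero]

-- one iteration of A's outer loop rotates left by pvS
theorem pv_row (one : List Int) (f : Int) (hne : one ≠ []) (hf : 0 ≤ f) :
    (PySem.List.sorted (pvDictA one f).keys (fun k => k) false).map
        (fun k => (pvDictA one f).getD k 0)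
      = one.rotate (pvS one.length f) := by
  set n := one.length with hn
  have hn0 : 0 < n := List.length_pos_of_ne_nil hne
  have hn0' : (0 : Int) < n := by exact_mod_cast hn0
  have hr0 := PySem.Int.mod_nonneg f hn0'
  have hrn := PySem.Int.mod_lt f hn0'
  set c : Nat := if f < (n : Int) then f.toNat else (PySem.Int.mod f n).toNat with hc
  have hcs : if f < ((n : Nat) : Int) then ((c : Int) = f ∧ c + pvS n f = n)
      else ((c : Int) = PySem.Int.mod f n ∧ c + pvS n f + 1 = n) := by
    by_cases hreg : f < (n : Int)
    · rw [if_pos hreg]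
      refine ⟨by rw [hc, if_pos hreg]; omega, ?_⟩
      rw [hc, pvS, if_pos hreg, if_pos hreg]
      omega
    · rw [if_neg hreg]
      refine ⟨by rw [hc, if_neg hreg]; omega, ?_⟩
      rw [hc, pvS, if_neg hreg, if_neg hreg]
      omega
  have hs_le : pvS n f ≤ n := by
    rw [pvS]
    split <;> omega
  have hcs_le : c + pvS n f ≤ n := by
    split_ifs at hcs <;> omega
  rw [pv_dictA_eq one f hne hf c (pvS n f) hcs]
  rw [pv_gen one c (pvS n f) (by omega) (by omega)]
  exact (List.rotate_eq_drop_append_take (by omega)).symm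

-- the outer loop, characterized
theorem pv_iter (L : List Int) (f : Int) (hne : L ≠ []) (hf : 0 ≤ f) (t m : Nat) (ht : t < m) :
    (pvBodyA f)^[t] (L :: List.replicate (m - 1) ([] : List Int), 0)
      = ((List.range (t + 1)).map (fun j => L.rotate (j * pvS L.length f))
           ++ List.replicate (m - 1 - t) [], t) := by
  induction t with
  | zero =>
    simp [List.range_one]
  | succ t ih =>
    have ht' : t < m := by omega
    rw [Function.iterate_succ_apply', ih ht']
    have hlrows : ((List.range (t + 1)).map
        (fun j => L.rotate (j * pvS L.length f))).length = t + 1 := by simp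
    have hone : ([] : List Int) ++ ((List.range (t + 1)).map
          (fun j => L.rotate (j * pvS L.length f))
            ++ List.replicate (m - 1 - t) []).getD t []
        = L.rotate (t * pvS L.length f) := by
      rw [List.nil_append, List.getD_append _ _ _ t (by rw [hlrows]; omega),
        List.getD_eq_getElem _ _ (by rw [hlrows]; omega)]
      simp
    unfold pvBodyA
    simp only [hone]
    have hlen1 : (L.rotate (t * pvS L.length f)).length = L.length := by simp
    have hne1 : L.rotate (t * pvS L.length f) ≠ [] := by
      intro h
      exact hne (by rwa [List.rotate_eq_nil_iff] at h)
    rw [pv_setfold _ _ _ _ (by rw [List.length_append, hlrows, List.length_replicate]; omega)]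
    rw [pv_row _ f hne1 hf, hlen1]
    have hrep : List.replicate (m - 1 - t) ([] : List Int)
        = [] :: List.replicate (m - 2 - t) [] := by
      rw [show m - 1 - t = (m - 2 - t) + 1 by omega, List.replicate_succ]
    have hget0 : ((List.range (t + 1)).map (fun j => L.rotate (j * pvS L.length f))
          ++ List.replicate (m - 1 - t) []).getD (t + 1) [] = [] := by
      rw [List.getD_eq_getElem _ _
        (by rw [List.length_append, hlrows, List.length_replicate]; omega)]
      rw [List.getElem_append_right (by omega)]
      simp [hlrows]
    rw [hget0, hrep]
    rw [pv_set_append_cons _ _ _ _ _ hlrows.symm]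
    rw [List.rotate_rotate, List.nil_append]
    refine Prod.ext ?_ rfl
    show _ = (List.range (t + 1 + 1)).map (fun j => L.rotate (j * pvS L.length f))
      ++ List.replicate (m - 1 - (t + 1)) []
    rw [show m - 1 - (t + 1) = m - 2 - t by omega]
    rw [List.range_succ, List.range_succ, List.map_append, List.map_append]
    simp [Nat.succ_mul, List.append_assoc]
    rw [List.range_succ, List.map_append]
    simp

theorem pv_foldl_iterate {σ α : Type} (l : List α) (F : σ → σ) (init : σ) :
    l.foldl (fun st _ => F st) init = F^[l.length] init := by
  induction l generalizing init with
  | nil => rfl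
  | cons a t ih => simp [List.foldl_cons, ih, Function.iterate_succ_apply]

theorem pv_A_char (L : List Int) (amount f : Int) (hne : L ≠ []) (hf : 0 ≤ f) :
    list_move L amount f
      = (List.range (1 + (amount - 1).toNat)).map
          (fun j => L.rotate (j * pvS L.length f)) := by
  rw [show list_move L amount f
      = ((PySem.List.pyRange 0 ((((PySem.List.pyRange 0 (amount - 1) 1).foldl
            (fun acc _ => acc ++ [([] : List Int)]) [L]).length : Int) - 1) 1).foldl
          (fun st _ => pvBodyA f st)
          ((PySem.List.pyRange 0 (amount - 1) 1).foldl
            (fun acc _ => acc ++ [([] : List Int)]) [L], 0)).1 by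
    unfold list_move
    rw [if_neg hne]]
  rw [PySem.List.foldl_append_singleton_eq_map (fun _ => ([] : List Int))]
  rw [List.map_const']
  set m : Nat := 1 + (amount - 1).toNat with hm
  have hlen0 : ([L] ++ List.replicate (PySem.List.pyRange 0 (amount - 1) 1).length []).length
      = m := by
    simp [PySem.List.length_pyRange_one]
    omega
  rw [pv_foldl_iterate]
  have hcnt : (PySem.List.pyRange 0 ((((([L] ++ List.replicate
      (PySem.List.pyRange 0 (amount - 1) 1).length []).length : Nat) : Int) - 1)) 1).length
      = m - 1 := by
    rw [PySem.List.length_pyRange_one, hlen0]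
    omega
  rw [hcnt]
  have hrepl : [L] ++ List.replicate (PySem.List.pyRange 0 (amount - 1) 1).length
      ([] : List Int) = L :: List.replicate (m - 1) [] := by
    rw [show (PySem.List.pyRange 0 (amount - 1) 1).length = m - 1 by
      rw [PySem.List.length_pyRange_one]; omega]
    rfl
  rw [hrepl, pv_iter L f hne hf (m - 1) m (by omega)]
  simp only [show m - 1 + 1 = m by omega, Nat.sub_self, List.replicate_zero, List.append_nil]

theorem pv_B_char (L : List Int) (amount f : Int) (hne : L ≠ []) :
    list_move_alt L amount f
      = (List.range (1 + (amount - 1).toNat)).map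
          (fun (j : Nat) => L.rotate ((PySem.Int.mod (-(j : Int) * f) L.length).toNat)) := by
  have hn0 : 0 < L.length := List.length_pos_of_ne_nil hne
  have hn0' : (0 : Int) < L.length := by exact_mod_cast hn0
  unfold list_move_alt
  rw [if_neg hne]
  rw [PySem.List.foldl_append_singleton_eq_map
    (fun k => PySem.List.slice L (some (PySem.Int.mod (-k * f) L.length)) none
      ++ PySem.List.slice L none (some (PySem.Int.mod (-k * f) L.length)))]
  rw [PySem.List.pyRange_one, List.map_map]
  rw [show 1 + (amount - 1).toNat = (amount - 1).toNat + 1 by omega, List.range_succ_eq_map,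
    List.map_cons, List.map_map, List.singleton_append]
  congr 1
  · have h0 : PySem.Int.mod (-((0 : Nat) : Int) * f) (L.length : Int) = 0 := by
      rw [show (-((0 : Nat) : Int) * f) = 0 by push_cast; ring,
        PySem.Int.mod_eq_emod_of_pos hn0']
      simp
    rw [h0]
    simp
  · refine List.map_congr_left ?_
    intro k hk
    have hm0 := PySem.Int.mod_nonneg (-(1 + (k : Int)) * f) hn0'
    have hmlt := PySem.Int.mod_lt (-(1 + (k : Int)) * f) hn0'
    simp only [Function.comp_apply]
    rw [show (-((Nat.succ k : Nat) : Int) * f) = -(1 + (k : Int)) * f by push_cast; ring]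
    rw [PySem.List.slice_from L hm0, PySem.List.slice_to L hm0]
    exact (List.rotate_eq_drop_append_take (by omega)).symm

theorem pv_snoc_eq_cons {α : Type} (t : List α) (a : α) (h : t ++ [a] = a :: t) :
    ∀ x ∈ t, x = a := by
  induction t generalizing a with
  | nil => simp
  | cons y t' ih =>
    simp only [List.cons_append, List.cons.injEq] at h
    obtain ⟨rfl, h2⟩ := h
    intro x hx
    rcases List.mem_cons.1 hx with rfl | hx'
    · rfl
    · exact ih _ h2 x hx'

theorem pv_rot1_const (L : List Int) (h : L.rotate 1 = L) : ∀ x ∈ L, x = L.headI := by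
  cases L with
  | nil => simp
  | cons a t =>
    rw [show (1 : Nat) = 0 + 1 from rfl, List.rotate_cons_succ, List.rotate_zero] at h
    intro x hx
    rcases List.mem_cons.1 hx with rfl | hx'
    · rfl
    · exact pv_snoc_eq_cons t a h x hx'

-- rotation-amount arithmetic shared by the verdict proofs
theorem pv_rot_eq_regime1 (L : List Int) (f : Int) (j : Nat) (hne : L ≠ [])
    (hf : 0 ≤ f) (hreg : f < (L.length : Int)) :
    L.rotate (j * pvS L.length f)
      = L.rotate ((PySem.Int.mod (-(j : Int) * f) L.length).toNat) := by
  have hn0 : 0 < L.length := List.length_pos_of_ne_nil hne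
  have hn0' : (0 : Int) < L.length := by exact_mod_cast hn0
  have hu : PySem.Int.mod (-(j : Int) * f) L.length = (-(j : Int) * f) % (L.length : Int) :=
    PySem.Int.mod_eq_emod_of_pos hn0'
  have hu0 : 0 ≤ PySem.Int.mod (-(j : Int) * f) L.length :=
    PySem.Int.mod_nonneg _ hn0'
  have hs : pvS L.length f = L.length - f.toNat := by rw [pvS, if_pos hreg]
  have hcast : ((L.length - f.toNat : Nat) : Int) = (L.length : Int) - f := by omega
  have hmodeq : ((j * pvS L.length f : Nat) : Int) % (L.length : Int)
      = (-(j : Int) * f) % (L.length : Int) := by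
    have hd : (L.length : Int) ∣ (-(j : Int) * f - (j * pvS L.length f : Nat)) := by
      refine ⟨-(j : Int), ?_⟩
      push_cast [hs, hcast]
      ring
    exact Int.modEq_iff_dvd.2 hd
  have hInt : (j * pvS L.length f) % L.length
      = (PySem.Int.mod (-(j : Int) * f) L.length).toNat := by
    have hcc : (((j * pvS L.length f) % L.length : Nat) : Int)
        = PySem.Int.mod (-(j : Int) * f) L.length := by
      rw [Int.natCast_mod, hmodeq, hu]
    omega
  conv_lhs => rw [← List.rotate_mod]
  rw [hInt]

-- ===== VERDICT (by name: the statement is the Claim_ definition above) =====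
theorem list_move_spec : Claim_unchanged_list_move := by
  intro L amount f _hdom hf hD
  show list_move L amount f = list_move_alt L amount f
  by_cases hL : L = []
  · subst hL
    simp only [list_move, list_move_alt, if_pos rfl]
    rw [PySem.List.foldl_append_singleton_eq_map (fun _ => ([] : List Int))]
    simp
  · have hn0 : 0 < L.length := List.length_pos_of_ne_nil hL
    have hn0' : (0 : Int) < L.length := by exact_mod_cast hn0
    rw [pv_A_char L amount f hL hf, pv_B_char L amount f hL]
    refine List.map_congr_left ?_
    intro j hj
    have hj' := List.mem_range.1 hj
    by_cases hreg : f < (L.length : Int)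
    · exact pv_rot_eq_regime1 L f j hL hf hreg
    · have hsplit : (¬ ∃ x ∈ L, x ≠ L.headI) ∨ amount < 2 := by
        by_contra hc
        push_neg at hc
        exact hD ⟨hc.1, by omega, by omega⟩
      rcases hsplit with hconst | hamt
      · push_neg at hconst
        have hrep := List.eq_replicate_of_mem hconst
        rw [hrep, List.rotate_replicate, List.rotate_replicate]
      · have hj0 : j = 0 := by omega
        subst hj0
        simp only [Nat.zero_mul, List.rotate_zero, Nat.cast_zero, neg_zero, Int.zero_mul]
        rw [show PySem.Int.mod 0 (L.length : Int) = 0 by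
          rw [PySem.Int.mod_eq_emod_of_pos hn0']; simp]
        simp

theorem list_move_changed : Claim_changed_list_move := by
  unfold Claim_changed_list_move; decide

theorem list_move_tight : Claim_exact_list_move := by
  intro L amount f _hdom hf hD hEq
  obtain ⟨hx, hamt, hflen⟩ := hD
  · have hne : L ≠ [] := by
      rintro rfl
      obtain ⟨x, hx0, _⟩ := hx
      simp at hx0
    have hn0 : 0 < L.length := List.length_pos_of_ne_nil hne
    have hn0' : (0 : Int) < L.length := by exact_mod_cast hn0
    have hn2 : 2 ≤ L.length := by
      rcases L with _ | ⟨a, _ | ⟨b, t⟩⟩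
      · exact absurd rfl hne
      · obtain ⟨x, hx0, hxne⟩ := hx
        rw [List.mem_singleton.1 hx0] at hxne
        exact absurd rfl hxne
      · simp
    have hreg : ¬ f < (L.length : Int) := by omega
    obtain ⟨r, hrdef⟩ : ∃ r : Int, PySem.Int.mod f (L.length : Int) = r := ⟨_, rfl⟩
    have hr : r = f % (L.length : Int) := by
      rw [← hrdef]; exact PySem.Int.mod_eq_emod_of_pos hn0'
    have hr0 : 0 ≤ r := hrdef ▸ PySem.Int.mod_nonneg f hn0'
    have hrn : r < L.length := hrdef ▸ PySem.Int.mod_lt f hn0'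
    have hs : pvS L.length f = L.length - 1 - r.toNat := by rw [pvS, if_neg hreg, hrdef]
    rw [pv_A_char L amount f hne hf, pv_B_char L amount f hne] at hEq
    have h1 : L.rotate (1 * pvS L.length f)
        = L.rotate ((PySem.Int.mod (-((1 : Nat) : Int) * f) (L.length : Int)).toNat) := by
      have h2 : ((List.range (1 + (amount - 1).toNat)).map
            (fun j => L.rotate (j * pvS L.length f)))[1]'(by simp; omega)
          = ((List.range (1 + (amount - 1).toNat)).map
            (fun (j : Nat) => L.rotate ((PySem.Int.mod (-(j : Int) * f) L.length).toNat)))[1]'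
              (by simp; omega) := by
        simp only [hEq]
      simpa using h2
    rw [Nat.one_mul] at h1
    rw [show (-((1 : Nat) : Int) * f) = -(1 : Int) * f by push_cast; ring] at h1
    have hneg : PySem.Int.mod (-(1 : Int) * f) (L.length : Int)
        = if r = 0 then 0 else (L.length : Int) - r := by
      rw [PySem.Int.mod_eq_emod_of_pos hn0']
      have hfr : (L.length : Int) ∣ (f - r) := by
        refine ⟨f / (L.length : Int), ?_⟩
        rw [hr, Int.emod_def]
        ring
      obtain ⟨q, hq⟩ := hfr
      have hmod : (-(1 : Int) * f) % (L.length : Int)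
          = ((if r = 0 then 0 else (L.length : Int) - r)) % (L.length : Int) := by
        have hd : (L.length : Int)
            ∣ ((if r = 0 then 0 else (L.length : Int) - r) - -(1 : Int) * f) := by
          split_ifs with h0
          · exact ⟨q, by omega⟩
          · exact ⟨q + 1, by push_cast; linarith [hq]⟩
        exact Int.modEq_iff_dvd.2 hd
      rw [hmod, Int.emod_eq_of_lt (by split_ifs <;> omega) (by split_ifs <;> omega)]
    have hrot1 : L.rotate 1 = L := by
      by_cases h0 : r = 0
      · rw [hs, hneg, if_pos h0, Int.toNat_zero, List.rotate_zero] at h1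
        have h2 := congrArg (fun l : List Int => l.rotate 1) h1
        simp only [List.rotate_rotate] at h2
        rw [show L.length - 1 - r.toNat + 1 = L.length by omega, List.rotate_length] at h2
        exact h2.symm
      · rw [hs, hneg, if_neg h0] at h1
        rw [show ((L.length : Int) - r).toNat = L.length - 1 - r.toNat + 1 by omega] at h1
        have h2 := congrArg
          (fun l : List Int => l.rotate (L.length - (L.length - 1 - r.toNat))) h1
        simp only [List.rotate_rotate] at h2
        rw [show L.length - 1 - r.toNat + (L.length - (L.length - 1 - r.toNat))
            = L.length by omega, List.rotate_length] at h2
        rw [show L.length - 1 - r.toNat + 1 + (L.length - (L.length - 1 - r.toNat))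
            = L.length + 1 by omega] at h2
        rw [← List.rotate_mod L (L.length + 1),
          show (L.length + 1) % L.length = 1 by
            rw [Nat.add_mod_left]
            exact Nat.mod_eq_of_lt (by omega)] at h2
        exact h2.symm
    obtain ⟨x, hx0, hxne⟩ := hx
    exact hxne (pv_rot1_const L hrot1 x hx0)
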